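-- pv_equiv track=rewrite | github.com/Zarete/Team-Bacillus | ORF/ORF.py | getGeneticCode
-- ===== SOURCE A (Python) =====
-- def getGeneticCode(NCBI_ID):
--
--     """Get the Genetic Code wanted
--
--     Two genetics code are implemented in the function, the standard code and the code for mycoplasma.
--     This function is written by Julien Benetti.
--
--     Args:
--         NCBI_ID: Genetic ID from the NCBI as an integer (1=Standard, 4=Mycoplasma)
--
--     Returns:
--         The function getGeneticCode returns the codon Table in a dictionnary with the codon
--         as keys and the amino acid as value.
--     """
--
--     if NCBI_ID==1:
--         base1='TTTTTTTTTTTTTTTTCCCCCCCCCCCCCCCCAAAAAAAAAAAAAAAAGGGGGGGGGGGGGGGG'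
--         base2='TTTTCCCCAAAAGGGGTTTTCCCCAAAAGGGGTTTTCCCCAAAAGGGGTTTTCCCCAAAAGGGG'
--         base3='TCAGTCAGTCAGTCAGTCAGTCAGTCAGTCAGTCAGTCAGTCAGTCAGTCAGTCAGTCAGTCAG'
--         aas  ='FFLLSSSSYY**CC*WLLLLPPPPHHQQRRRRIIIMTTTTNNKKSSRRVVVVAAAADDEEGGGG'
--         table = {}
--         for i in range(0,len(aas)):
--             codon = base1[i]+base2[i]+base3[i]
--             aa = aas[i]
--             table[codon] = aa
--         return table
--
--     if NCBI_ID==4: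
--         base1='TTTTTTTTTTTTTTTTCCCCCCCCCCCCCCCCAAAAAAAAAAAAAAAAGGGGGGGGGGGGGGGG'
--         base2='TTTTCCCCAAAAGGGGTTTTCCCCAAAAGGGGTTTTCCCCAAAAGGGGTTTTCCCCAAAAGGGG'
--         base3='TCAGTCAGTCAGTCAGTCAGTCAGTCAGTCAGTCAGTCAGTCAGTCAGTCAGTCAGTCAGTCAG'
--         aas  ='FFLLSSSSYY**CCWWLLLLPPPPHHQQRRRRIIIMTTTTNNKKSSRRVVVVAAAADDEEGGGG'
--         table = {}
--         for i in range(0,len(aas)):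
--             codon = base1[i]+base2[i]+base3[i]
--             aa = aas[i]
--             table[codon] = aa
--         return table
-- ===== SOURCE B (Python) =====
-- def getGeneticCode(NCBI_ID):
--     """Codon table via nested base loops zipped against the amino-acid string."""
--     if NCBI_ID == 1:
--         aas = 'FFLLSSSSYY**CC*WLLLLPPPPHHQQRRRRIIIMTTTTNNKKSSRRVVVVAAAADDEEGGGG'
--     elif NCBI_ID == 4:
--         aas = 'FFLLSSSSYY**CCWWLLLLPPPPHHQQRRRRIIIMTTTTNNKKSSRRVVVVAAAADDEEGGGG'
--     else:
--         return None
--     codons = [b1 + b2 + b3 for b1 in 'TCAG' for b2 in 'TCAG' for b3 in 'TCAG']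
--     return dict(zip(codons, aas))
-- ===== Notes on version B (the rewrite author's own statement) =====
-- stated objective: idiomatic
-- what changed: Replaces the three long parallel base strings indexed by a counting loop with three nested loops over 'TCAG' generating the codons in the same order, zipped against the amino-acid string to build the dict in one expression.
import Mathlib
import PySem

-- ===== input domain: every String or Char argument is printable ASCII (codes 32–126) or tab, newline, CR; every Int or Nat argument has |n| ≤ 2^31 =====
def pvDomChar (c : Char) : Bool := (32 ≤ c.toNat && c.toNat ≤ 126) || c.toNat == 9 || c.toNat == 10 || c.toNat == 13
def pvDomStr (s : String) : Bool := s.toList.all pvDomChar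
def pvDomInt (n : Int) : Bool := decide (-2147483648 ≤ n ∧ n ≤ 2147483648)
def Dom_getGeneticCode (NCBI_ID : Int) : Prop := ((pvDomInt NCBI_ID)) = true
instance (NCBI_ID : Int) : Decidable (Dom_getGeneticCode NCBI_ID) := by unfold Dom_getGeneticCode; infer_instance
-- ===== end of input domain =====

set_option maxRecDepth 8000


-- ===== PORT A =====
-- one honest line: B builds the same table by three nested base loops zipped with the amino-acid string (idiomatic decomposition; same cost).
def getGeneticCode (NCBI_ID : Int) : Option (List (String × String)) :=
  if NCBI_ID = 1 then
    let base1 := "TTTTTTTTTTTTTTTTCCCCCCCCCCCCCCCCAAAAAAAAAAAAAAAAGGGGGGGGGGGGGGGG"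
    let base2 := "TTTTCCCCAAAAGGGGTTTTCCCCAAAAGGGGTTTTCCCCAAAAGGGGTTTTCCCCAAAAGGGG"
    let base3 := "TCAGTCAGTCAGTCAGTCAGTCAGTCAGTCAGTCAGTCAGTCAGTCAGTCAGTCAGTCAGTCAG"
    let aas   := "FFLLSSSSYY**CC*WLLLLPPPPHHQQRRRRIIIMTTTTNNKKSSRRVVVVAAAADDEEGGGG"
    let table := (PySem.List.pyRange 0 (PySem.Str.len aas) 1).foldl (fun t i =>
      -- all four indices are always in range, so the `none` arm (Python IndexError) is never reached
      match PySem.Str.pyGet? base1 i, PySem.Str.pyGet? base2 i, PySem.Str.pyGet? base3 i, PySem.Str.pyGet? aas i with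
      | some c1, some c2, some c3, some a => t.insert (String.ofList [c1, c2, c3]) (String.ofList [a])
      | _, _, _, _ => t) PySem.Dict.empty
    some table.items
  else if NCBI_ID = 4 then
    let base1 := "TTTTTTTTTTTTTTTTCCCCCCCCCCCCCCCCAAAAAAAAAAAAAAAAGGGGGGGGGGGGGGGG"
    let base2 := "TTTTCCCCAAAAGGGGTTTTCCCCAAAAGGGGTTTTCCCCAAAAGGGGTTTTCCCCAAAAGGGG"
    let base3 := "TCAGTCAGTCAGTCAGTCAGTCAGTCAGTCAGTCAGTCAGTCAGTCAGTCAGTCAGTCAGTCAG"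
    let aas   := "FFLLSSSSYY**CCWWLLLLPPPPHHQQRRRRIIIMTTTTNNKKSSRRVVVVAAAADDEEGGGG"
    let table := (PySem.List.pyRange 0 (PySem.Str.len aas) 1).foldl (fun t i =>
      match PySem.Str.pyGet? base1 i, PySem.Str.pyGet? base2 i, PySem.Str.pyGet? base3 i, PySem.Str.pyGet? aas i with
      | some c1, some c2, some c3, some a => t.insert (String.ofList [c1, c2, c3]) (String.ofList [a])
      | _, _, _, _ => t) PySem.Dict.empty
    some table.items
  else
    none

-- ===== PORT B =====
def getGeneticCode_alt (NCBI_ID : Int) : Option (List (String × String)) :=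
  let aas? : Option String :=
    if NCBI_ID = 1 then some "FFLLSSSSYY**CC*WLLLLPPPPHHQQRRRRIIIMTTTTNNKKSSRRVVVVAAAADDEEGGGG"
    else if NCBI_ID = 4 then some "FFLLSSSSYY**CCWWLLLLPPPPHHQQRRRRIIIMTTTTNNKKSSRRVVVVAAAADDEEGGGG"
    else none
  match aas? with
  | none => none
  | some aas =>
    let bases := ['T', 'C', 'A', 'G']
    let codons := bases.flatMap (fun b1 => bases.flatMap (fun b2 => bases.map (fun b3 => String.ofList [b1, b2, b3])))
    let table := (List.zip codons aas.toList).foldl (fun d p => d.insert p.1 (String.ofList [p.2])) PySem.Dict.empty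
    some table.items

-- ===== PRECONDITION & SPEC =====
def Spec_getGeneticCode (NCBI_ID : Int) (out : Option (List (String × String))) : Prop := out = getGeneticCode_alt NCBI_ID
instance (NCBI_ID : Int) (out : Option (List (String × String))) : Decidable (Spec_getGeneticCode NCBI_ID out) := by unfold Spec_getGeneticCode; infer_instance

-- ===== CLAIM (what is proved, stated in full; the proofs are below) =====
def Claim_equal_getGeneticCode : Prop := ∀ (NCBI_ID : Int), Dom_getGeneticCode NCBI_ID → Spec_getGeneticCode NCBI_ID (getGeneticCode NCBI_ID)

-- ===== LEMMAS AND PROOFS =====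

-- ===== VERDICT (by name: the statement is the Claim_ definition above) =====
theorem getGeneticCode_spec : Claim_equal_getGeneticCode := by
  intro n _
  unfold Spec_getGeneticCode
  by_cases h1 : n = 1
  · subst h1; decide
  · by_cases h4 : n = 4
    · subst h4; decide
    · simp [getGeneticCode, getGeneticCode_alt, h1, h4]
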